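-- pv_equiv track=rewrite | github.com/acm-projects/Rolemap | backend/scraping/enrich_graph.py | _topological_sort_check
-- ===== SOURCE A (Python) =====
-- from collections import defaultdict
--
-- def _topological_sort_check(nodes: set, edges: list[tuple]) -> list[tuple]:
--     """
--     Returns a list of edges that form cycles using Kahn's algorithm.
--     Cycles are detected by finding nodes that never reach in-degree 0.
--     Returns the list of 'extra' edges to remove (LLM-sourced preferred).
--     """
--     from collections import deque
--
--     adj: dict[str, set] = defaultdict(set)
--     in_degree: dict[str, int] = defaultdict(int)
--
--     for u, v, source in edges:
--         if v not in adj[u]: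
--             adj[u].add(v)
--             in_degree[v] += 1
--         in_degree.setdefault(u, in_degree.get(u, 0))
--
--     queue = deque(n for n in nodes if in_degree.get(n, 0) == 0)
--     visited = set()
--
--     while queue:
--         node = queue.popleft()
--         visited.add(node)
--         for neighbor in adj.get(node, []):
--             in_degree[neighbor] -= 1
--             if in_degree[neighbor] == 0:
--                 queue.append(neighbor)
--
--     cycle_nodes = nodes - visited
--     if not cycle_nodes:
--         return []  # No cycles
--
--     # Find edges that are part of cycles (both endpoints in cycle_nodes)
--     # Prefer removing LLM edges over existing roadmap.sh edges
--     cycle_edges = [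
--         (u, v, src) for u, v, src in edges
--         if u in cycle_nodes and v in cycle_nodes
--     ]
--     return cycle_edges
-- ===== SOURCE B (Python) =====
-- def _topological_sort_check(nodes: set, edges: list[tuple]) -> list[tuple]:
--     """
--     Round-based fixpoint re-implementation: instead of Kahn's queue with
--     in-degree counters, repeatedly mark vertices 'removable' (a vertex with
--     no incoming edges that belongs to `nodes`, or one all of whose distinct
--     predecessors are already removable) until nothing changes.  The nodes of
--     `nodes` that are never removable are exactly the cycle nodes.
--     """
--     preds: dict = {}
--     verts = set(nodes)
--     for u, v, _src in edges:
--         verts.add(u)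
--         verts.add(v)
--         preds.setdefault(v, set()).add(u)
--
--     removable: set = set()
--     for _ in range(len(verts) + 1):
--         new = {w for w in verts
--                if w not in removable
--                and (preds[w] <= removable if w in preds else w in nodes)}
--         if not new:
--             break
--         removable |= new
--
--     cycle_nodes = nodes - removable
--     return [(u, v, src) for u, v, src in edges
--             if u in cycle_nodes and v in cycle_nodes]
-- ===== Notes on version B (the rewrite author's own statement) =====
-- stated objective: alternative
-- what changed: Replaces Kahn's worklist algorithm (deque + per-edge in-degree counters, adjacency sets) by a round-based monotone fixpoint: build only a deduplicated predecessor map and repeatedly mark vertices removable (no predecessors and in `nodes`, or all distinct predecessors already removable) until stable; cycle nodes are the unremovable members of `nodes`.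
import Mathlib
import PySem

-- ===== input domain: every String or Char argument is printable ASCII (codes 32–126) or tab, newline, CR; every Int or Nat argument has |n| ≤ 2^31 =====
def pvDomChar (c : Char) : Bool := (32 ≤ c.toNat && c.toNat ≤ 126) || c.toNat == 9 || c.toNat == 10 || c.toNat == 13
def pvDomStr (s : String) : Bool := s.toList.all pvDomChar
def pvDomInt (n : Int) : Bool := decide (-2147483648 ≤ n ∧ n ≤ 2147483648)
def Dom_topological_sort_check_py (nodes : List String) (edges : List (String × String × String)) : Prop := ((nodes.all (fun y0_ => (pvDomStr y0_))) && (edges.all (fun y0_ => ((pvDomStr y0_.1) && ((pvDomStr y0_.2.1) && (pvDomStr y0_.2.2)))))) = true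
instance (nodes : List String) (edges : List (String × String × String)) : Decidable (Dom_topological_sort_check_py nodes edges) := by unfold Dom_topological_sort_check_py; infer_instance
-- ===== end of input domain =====

-- B replaces Kahn's worklist algorithm (deque + in-degree counters) by a round-based
-- monotone fixpoint over a predecessor map; same return value (alternative algorithm,
-- no speed claim).  `nodes` is a Python set: it is modelled as a duplicate-free list
-- (Pre_), and set-iteration order never influences either result.

-- ===== PORT A =====
-- one edge of the build loop: adj[u] (defaultdict), dedup guard, in_degree updates
def pvAEdgeStep (st : PySem.Dict String (PySem.Set String) × PySem.Dict String Int)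
    (e : String × String × String) :
    PySem.Dict String (PySem.Set String) × PySem.Dict String Int :=
  let su := st.1.getD e.1 PySem.Set.empty
  if PySem.Set.contains su e.2.1 then
    (st.1.insert e.1 su, st.2.setdefault e.1 ((st.2.get? e.1).getD 0))
  else
    let indeg' := st.2.modify e.2.1 0 (· + 1)
    (st.1.insert e.1 (PySem.Set.add su e.2.1),
     indeg'.setdefault e.1 ((indeg'.get? e.1).getD 0))

-- one neighbour of the while-loop body: decrement, test for zero, enqueue
def pvAStep (st : PySem.Dict String Int × List String) (w : String) :
    PySem.Dict String Int × List String :=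
  let indeg := st.1.modify w 0 (· - 1)
  if indeg.getD w 0 == 0 then (indeg, st.2 ++ [w]) else (indeg, st.2)

-- termination measure for the while-loop: |queue| + Σ (positive parts of the counters)
def pvAMeasure (adj : PySem.Dict String (PySem.Set String)) (indeg : PySem.Dict String Int)
    (queue : List String) : Nat :=
  queue.length + ((PySem.Set.ofList adj.values.flatten).map (fun v => (indeg.getD v 0).toNat)).sum

lemma pv_sum_drop {T : List String} (hT : T.Nodup) {w : String} (hw : w ∈ T)
    (f g : String → Nat) (hfw : f w + 1 ≤ g w) (ho : ∀ v, v ≠ w → f v ≤ g v) :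
    (T.map f).sum + 1 ≤ (T.map g).sum := by
  induction T with
  | nil => cases hw
  | cons a T ih =>
    obtain ⟨haT, hT'⟩ := List.nodup_cons.mp hT
    rcases List.mem_cons.mp hw with rfl | hw'
    · have htail : (T.map f).sum ≤ (T.map g).sum :=
        List.sum_le_sum (fun v hv => ho v (fun h => haT (h ▸ hv)))
      simp only [List.map_cons, List.sum_cons]
      omega
    · have hhead : f a ≤ g a := ho a (fun h => haT (h ▸ hw'))
      have := ih hT' hw'
      simp only [List.map_cons, List.sum_cons]
      omega

lemma pvAStep_fold_measure (T : List String) (hT : T.Nodup) :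
    ∀ (l : List String) (d : PySem.Dict String Int) (q : List String),
      (∀ x ∈ l, x ∈ T) →
      (l.foldl pvAStep (d, q)).2.length
          + (T.map (fun v => (((l.foldl pvAStep (d, q)).1.getD v 0)).toNat)).sum
        ≤ q.length + (T.map (fun v => ((d.getD v 0)).toNat)).sum := by
  intro l
  induction l with
  | nil => intro d q _; simp
  | cons w l ih =>
    intro d q hmem
    have hwT : w ∈ T := hmem w List.mem_cons_self
    have hstep : pvAStep (d, q) w =
        if (d.modify w 0 (· - 1)).getD w 0 == 0 then (d.modify w 0 (· - 1), q ++ [w])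
        else (d.modify w 0 (· - 1), q) := by
      simp [pvAStep]
    have hgd : ∀ v, (d.modify w 0 (· - 1)).getD v 0
        = if v = w then d.getD w 0 - 1 else d.getD v 0 := fun v =>
      PySem.Dict.getD_modify (d := d) (k := w) (k' := v) (d0 := 0) (f := (· - 1))
    simp only [List.foldl_cons, hstep]
    by_cases h0 : (d.modify w 0 (· - 1)).getD w 0 == 0
    · rw [if_pos h0]
      refine le_trans (ih _ _ (fun x hx => hmem x (List.mem_cons_of_mem _ hx))) ?_
      have hw1 : d.getD w 0 = 1 := by
        have h0' : (d.modify w 0 (· - 1)).getD w 0 = 0 := by simpa using h0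
        rw [hgd w, if_pos rfl] at h0'
        omega
      have hdrop : (T.map (fun v => (((d.modify w 0 (· - 1)).getD v 0)).toNat)).sum + 1
          ≤ (T.map (fun v => ((d.getD v 0)).toNat)).sum := by
        refine pv_sum_drop hT hwT _ _ ?_ ?_
        · rw [hgd w]; simp [hw1]
        · intro v hvw; rw [hgd v, if_neg hvw]
      simp only [List.length_append, List.length_cons, List.length_nil]
      omega
    · rw [if_neg h0]
      refine le_trans (ih _ _ (fun x hx => hmem x (List.mem_cons_of_mem _ hx))) ?_
      have hmono : (T.map (fun v => (((d.modify w 0 (· - 1)).getD v 0)).toNat)).sum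
          ≤ (T.map (fun v => ((d.getD v 0)).toNat)).sum := by
        refine List.sum_le_sum (fun v _ => ?_)
        rw [hgd v]
        split
        · next h => subst h; exact Int.toNat_le_toNat (by omega)
        · exact le_refl _
      omega

lemma pv_mem_adjT {adj : PySem.Dict String (PySem.Set String)} {node x : String}
    (hx : x ∈ (adj.get? node).getD PySem.Set.empty) :
    x ∈ PySem.Set.ofList adj.values.flatten := by
  rw [PySem.Set.mem_ofList]
  cases h : adj.get? node with
  | none => rw [h] at hx; cases hx
  | some s =>
    rw [h] at hx
    refine List.mem_flatten.mpr ⟨s, ?_, hx⟩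
    have hmem := PySem.Dict.mem_items_of_get?_eq_some (d := adj) h
    simpa only [PySem.Dict.values] using List.mem_map_of_mem hmem

-- the while-loop of Kahn's algorithm
def pvALoop (adj : PySem.Dict String (PySem.Set String)) (queue : List String)
    (visited : PySem.Set String) (indeg : PySem.Dict String Int) : PySem.Set String :=
  match queue with
  | [] => visited
  | node :: rest =>
    let nbrs : List String := (adj.get? node).getD PySem.Set.empty  -- adj.get(node, [])
    let st := nbrs.foldl pvAStep (indeg, rest)
    pvALoop adj st.2 (PySem.Set.add visited node) st.1
termination_by pvAMeasure adj indeg queue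
decreasing_by
  have hsub : ∀ x ∈ (adj.get? node).getD PySem.Set.empty,
      x ∈ PySem.Set.ofList adj.values.flatten := fun x hx => pv_mem_adjT hx
  have h := pvAStep_fold_measure (PySem.Set.ofList adj.values.flatten)
    (PySem.Set.nodup_ofList _) ((adj.get? node).getD PySem.Set.empty) indeg rest hsub
  simp only [pvAMeasure, List.length_cons]
  omega

def topological_sort_check_py (nodes : List String) (edges : List (String × String × String)) :
    List (String × String × String) :=
  let st := edges.foldl pvAEdgeStep (PySem.Dict.empty, PySem.Dict.empty)
  let queue := nodes.filter (fun n => st.2.getD n 0 == 0)   -- in_degree.get(n, 0) == 0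
  let visited := pvALoop st.1 queue PySem.Set.empty st.2
  let cycle_nodes := PySem.Set.diff (PySem.Set.ofList nodes) visited
  if cycle_nodes.isEmpty then []
  else edges.filter (fun e =>
    PySem.Set.contains cycle_nodes e.1 && PySem.Set.contains cycle_nodes e.2.1)

-- ===== PORT B =====
-- one edge of B's build loop: verts.add, preds.setdefault(v, set()).add(u)
def pvBBuildStep (st : PySem.Set String × PySem.Dict String (PySem.Set String))
    (e : String × String × String) : PySem.Set String × PySem.Dict String (PySem.Set String) :=
  let p := (st.2.get? e.2.1).getD PySem.Set.empty
  (PySem.Set.add (PySem.Set.add st.1 e.1) e.2.1,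
   st.2.insert e.2.1 (PySem.Set.add p e.1))

-- membership condition of the set comprehension
def pvBCond (nodes : List String) (preds : PySem.Dict String (PySem.Set String))
    (removable : PySem.Set String) (w : String) : Bool :=
  !(PySem.Set.contains removable w) &&
    (match preds.get? w with
     | some p => PySem.Set.issubset p removable
     | none => nodes.contains w)

-- the bounded fixpoint rounds (`for _ in range(len(verts)+1): ... if not new: break`)
def pvBRounds (nodes : List String) (verts : PySem.Set String)
    (preds : PySem.Dict String (PySem.Set String)) :
    Nat → PySem.Set String → PySem.Set String
  | 0, r => r
  | fuel+1, r =>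
    let news := verts.filter (pvBCond nodes preds r)
    if news.isEmpty then r
    else pvBRounds nodes verts preds fuel (PySem.Set.update r news)

def topological_sort_check_py_alt (nodes : List String) (edges : List (String × String × String)) :
    List (String × String × String) :=
  let st := edges.foldl pvBBuildStep (PySem.Set.ofList nodes, PySem.Dict.empty)
  let removable := pvBRounds nodes st.1 st.2 (st.1.length + 1) PySem.Set.empty   -- range(len(verts)+1)
  let cycle_nodes := PySem.Set.diff (PySem.Set.ofList nodes) removable
  edges.filter (fun e =>
    PySem.Set.contains cycle_nodes e.1 && PySem.Set.contains cycle_nodes e.2.1)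

-- ===== PRECONDITION & SPEC =====
-- `nodes` is a Python set; the list must represent it, i.e. hold distinct elements
-- (on a duplicate-element list Python A, which needs a real set, would raise TypeError).
def Pre_topological_sort_check_py (nodes : List String) (edges : List (String × String × String)) : Prop :=
  nodes.Nodup
instance (nodes : List String) (edges : List (String × String × String)) : Decidable (Pre_topological_sort_check_py nodes edges) := by unfold Pre_topological_sort_check_py; infer_instance

def pvWitness_topological_sort_check_py : List String × (List (String × String × String)) :=
  (["a", "b", "c"], [("a", "b", "llm"), ("b", "a", "rm"), ("b", "c", "llm")])

def Spec_topological_sort_check_py (nodes : List String) (edges : List (String × String × String)) (out : List (String × String × String)) : Prop := out = topological_sort_check_py_alt nodes edges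
instance (nodes : List String) (edges : List (String × String × String)) (out : List (String × String × String)) : Decidable (Spec_topological_sort_check_py nodes edges out) := by unfold Spec_topological_sort_check_py; infer_instance

-- ===== CLAIM (what is proved, stated in full; the proofs are below) =====
def Claim_equal_topological_sort_check_py : Prop := ∀ (nodes : List String) (edges : List (String × String × String)), Dom_topological_sort_check_py nodes edges → Pre_topological_sort_check_py nodes edges → Spec_topological_sort_check_py nodes edges (topological_sort_check_py nodes edges)

-- ===== LEMMAS AND PROOFS =====

-- abstract view of the edge list
def pvEdge (edges : List (String × String × String)) (u v : String) : Prop :=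
  ∃ s, (u, v, s) ∈ edges

def pvSrcs (edges : List (String × String × String)) (v : String) : List String :=
  edges.filterMap (fun e => if e.2.1 = v then some e.1 else none)

def pvPreds (edges : List (String × String × String)) (v : String) : List String :=
  PySem.Set.ofList (pvSrcs edges v)

def pvIndegN (edges : List (String × String × String)) (v : String) : Nat :=
  (pvPreds edges v).length

lemma mem_pvSrcs {edges : List (String × String × String)} {u v : String} :
    u ∈ pvSrcs edges v ↔ pvEdge edges u v := by
  constructor
  · intro h
    obtain ⟨e, he, hif⟩ := List.mem_filterMap.mp h
    by_cases hv : e.2.1 = v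
    · rw [if_pos hv] at hif
      obtain rfl : e.1 = u := by injection hif
      exact ⟨e.2.2, by rw [← hv]; exact he⟩
    · rw [if_neg hv] at hif; cases hif
  · rintro ⟨s, hs⟩
    exact List.mem_filterMap.mpr ⟨(u, v, s), hs, by simp⟩

lemma mem_pvPreds {edges : List (String × String × String)} {u v : String} :
    u ∈ pvPreds edges v ↔ pvEdge edges u v := by
  rw [pvPreds, PySem.Set.mem_ofList]; exact mem_pvSrcs

lemma pvPreds_nodup (edges : List (String × String × String)) (v : String) :
    (pvPreds edges v).Nodup := PySem.Set.nodup_ofList _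

lemma pvIndegN_pos {edges : List (String × String × String)} {u v : String}
    (h : pvEdge edges u v) : 1 ≤ pvIndegN edges v :=
  List.length_pos_of_mem (mem_pvPreds.mpr h)

lemma pvIndegN_eq_zero {edges : List (String × String × String)} {v : String} :
    pvIndegN edges v = 0 ↔ ∀ u, ¬ pvEdge edges u v := by
  rw [pvIndegN, List.length_eq_zero_iff, List.eq_nil_iff_forall_not_mem]
  exact ⟨fun h u he => h u (mem_pvPreds.mpr he), fun h u hm => h u (mem_pvPreds.mp hm)⟩

-- characterisation of A's build loop
def pvAdjOK (edges : List (String × String × String))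
    (adj : PySem.Dict String (PySem.Set String)) : Prop :=
  ∀ u, ((adj.get? u).getD PySem.Set.empty : List String).Nodup ∧
    ∀ v, (v ∈ (adj.get? u).getD PySem.Set.empty ↔ pvEdge edges u v)

def pvIndegOK (edges : List (String × String × String))
    (indeg : PySem.Dict String Int) : Prop :=
  ∀ v, indeg.getD v 0 = (pvIndegN edges v : Int)

lemma pv_setdefault_getD {κ ν : Type} [BEq κ] [LawfulBEq κ] (d : PySem.Dict κ ν) (k v : κ) (z : ν) :
    (d.setdefault k ((d.get? k).getD z)).getD v z = d.getD v z := by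
  by_cases hv : v = k
  · subst hv
    rw [PySem.Dict.getD_eq_get?_getD, PySem.Dict.get?_setdefault_self,
      PySem.Dict.getD_eq_get?_getD]
    cases h : d.get? v <;> simp
  · rw [PySem.Dict.getD_eq_get?_getD, PySem.Dict.get?_setdefault_of_ne _ _ hv,
      ← PySem.Dict.getD_eq_get?_getD]

lemma pvEdge_append_singleton {p : List (String × String × String)}
    {e : String × String × String} {u v : String} :
    pvEdge (p ++ [e]) u v ↔ (pvEdge p u v ∨ (u = e.1 ∧ v = e.2.1)) := by
  constructor
  · rintro ⟨s, hs⟩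
    rcases List.mem_append.mp hs with h | h
    · exact Or.inl ⟨s, h⟩
    · obtain rfl : (u, v, s) = e := by simpa using h
      exact Or.inr ⟨rfl, rfl⟩
  · rintro (⟨s, hs⟩ | ⟨rfl, rfl⟩)
    · exact ⟨s, List.mem_append.mpr (Or.inl hs)⟩
    · exact ⟨e.2.2, List.mem_append.mpr (Or.inr (by simp))⟩

lemma pvPreds_append_singleton (p : List (String × String × String))
    (e : String × String × String) (v : String) :
    pvPreds (p ++ [e]) v =
      if e.2.1 = v then PySem.Set.add (pvPreds p v) e.1 else pvPreds p v := by
  unfold pvPreds pvSrcs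
  rw [List.filterMap_append]
  by_cases hv : e.2.1 = v
  · rw [if_pos hv]
    have : List.filterMap (fun e => if e.2.1 = v then some e.1 else none) [e] = [e.1] := by
      simp [hv]
    rw [this, PySem.Set.ofList_append_singleton]
  · rw [if_neg hv]
    have : List.filterMap (fun e => if e.2.1 = v then some e.1 else none) [e] = [] := by
      simp [hv]
    rw [this, List.append_nil]

lemma pvAEdgeStep_inv {p : List (String × String × String)} {e : String × String × String}
    {st : PySem.Dict String (PySem.Set String) × PySem.Dict String Int}
    (h1 : pvAdjOK p st.1) (h2 : pvIndegOK p st.2) :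
    pvAdjOK (p ++ [e]) (pvAEdgeStep st e).1 ∧ pvIndegOK (p ++ [e]) (pvAEdgeStep st e).2 := by
  obtain ⟨adj, indeg⟩ := st
  dsimp only at h1 h2 ⊢
  simp only [pvAEdgeStep]
  have hsu' : adj.getD e.1 PySem.Set.empty = (adj.get? e.1).getD PySem.Set.empty :=
    PySem.Dict.getD_eq_get?_getD ..
  obtain ⟨hsuN, hsuM⟩ : (adj.getD e.1 PySem.Set.empty).Nodup ∧
      ∀ v, (v ∈ adj.getD e.1 PySem.Set.empty ↔ pvEdge p e.1 v) := by
    rw [hsu']; exact h1 e.1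
  by_cases hc : PySem.Set.contains (adj.getD e.1 PySem.Set.empty) e.2.1 = true
  · have hedge : pvEdge p e.1 e.2.1 := (hsuM e.2.1).mp ((PySem.Set.contains_iff _ _).mp hc)
    rw [if_pos hc]
    constructor
    · intro u
      by_cases hu : u = e.1
      · subst hu
        rw [PySem.Dict.get?_insert_self]
        refine ⟨hsuN, fun v => ?_⟩
        rw [Option.getD_some, pvEdge_append_singleton]
        constructor
        · intro hv; exact Or.inl ((hsuM v).mp hv)
        · rintro (hv | ⟨-, rfl⟩)
          · exact (hsuM v).mpr hv
          · exact (hsuM _).mpr hedge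
      · rw [PySem.Dict.get?_insert_of_ne _ _ hu]
        refine ⟨(h1 u).1, fun v => ?_⟩
        rw [pvEdge_append_singleton, (h1 u).2 v]
        simp [hu]
    · intro v
      rw [pv_setdefault_getD, h2 v]
      unfold pvIndegN
      rw [pvPreds_append_singleton]
      by_cases hv : e.2.1 = v
      · rw [if_pos hv]
        have hm : e.1 ∈ pvPreds p v := mem_pvPreds.mpr (hv ▸ hedge)
        rw [PySem.Set.add_of_mem hm]
      · rw [if_neg hv]
  · have hnedge : ¬ pvEdge p e.1 e.2.1 :=
      fun h => hc ((PySem.Set.contains_iff _ _).mpr ((hsuM _).mpr h))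
    have hne21 : e.2.1 ∉ adj.getD e.1 PySem.Set.empty :=
      fun h => hc ((PySem.Set.contains_iff _ _).mpr h)
    rw [if_neg hc]
    constructor
    · intro u
      by_cases hu : u = e.1
      · subst hu
        rw [PySem.Dict.get?_insert_self]
        refine ⟨PySem.Set.nodup_add _ _ hsuN, fun v => ?_⟩
        rw [Option.getD_some, PySem.Set.mem_add, pvEdge_append_singleton, hsuM v]
        constructor
        · rintro (h | rfl)
          · exact Or.inl h
          · exact Or.inr ⟨rfl, rfl⟩
        · rintro (h | ⟨-, rfl⟩)
          · exact Or.inl h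
          · exact Or.inr rfl
      · rw [PySem.Dict.get?_insert_of_ne _ _ hu]
        refine ⟨(h1 u).1, fun v => ?_⟩
        rw [pvEdge_append_singleton, (h1 u).2 v]
        simp [hu]
    · intro v
      rw [pv_setdefault_getD, PySem.Dict.getD_modify]
      unfold pvIndegN
      rw [pvPreds_append_singleton]
      by_cases hv : v = e.2.1
      · rw [if_pos hv, if_pos hv.symm, h2]
        have hnm : e.1 ∉ pvPreds p v := fun h => hnedge (hv ▸ mem_pvPreds.mp h)
        rw [hv, PySem.Set.add_of_not_mem (hv ▸ hnm), List.length_append]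
        simp [pvIndegN]
      · rw [if_neg hv, if_neg (fun h => hv h.symm)]
        exact h2 v

lemma pvABuild_inv : ∀ (l p : List (String × String × String))
    (st : PySem.Dict String (PySem.Set String) × PySem.Dict String Int),
    pvAdjOK p st.1 → pvIndegOK p st.2 →
    pvAdjOK (p ++ l) (l.foldl pvAEdgeStep st).1 ∧ pvIndegOK (p ++ l) (l.foldl pvAEdgeStep st).2 := by
  intro l
  induction l with
  | nil => intro p st h1 h2; simpa using ⟨h1, h2⟩
  | cons e l ih =>
    intro p st h1 h2
    obtain ⟨h1', h2'⟩ := pvAEdgeStep_inv (e := e) h1 h2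
    have := ih (p ++ [e]) (pvAEdgeStep st e) h1' h2'
    rwa [List.append_cons, List.foldl_cons]

lemma pvABuild_char (edges : List (String × String × String)) :
    pvAdjOK edges (edges.foldl pvAEdgeStep (PySem.Dict.empty, PySem.Dict.empty)).1 ∧
    pvIndegOK edges (edges.foldl pvAEdgeStep (PySem.Dict.empty, PySem.Dict.empty)).2 := by
  have := pvABuild_inv edges [] (PySem.Dict.empty, PySem.Dict.empty) ?_ ?_
  · simpa using this
  · intro u
    simp [PySem.Dict.get?_empty, PySem.Set.empty, pvEdge]
  · intro v
    simp [PySem.Dict.getD_empty, pvIndegN, pvPreds, pvSrcs, PySem.Set.ofList_nil]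

-- characterisation of B's build loop
def pvVertsOK (nodes : List String) (edges : List (String × String × String))
    (verts : PySem.Set String) : Prop :=
  (verts : List String).Nodup ∧
    ∀ x, (x ∈ verts ↔ (x ∈ nodes ∨ ∃ e ∈ edges, x = e.1 ∨ x = e.2.1))

def pvPredsOK (edges : List (String × String × String))
    (pd : PySem.Dict String (PySem.Set String)) : Prop :=
  ∀ v, (pd.get? v = none → ∀ u, ¬ pvEdge edges u v) ∧
    (∀ p, pd.get? v = some p → ((∃ u, u ∈ p) ∧ ∀ u, (u ∈ p ↔ pvEdge edges u v)))

lemma pvBBuildStep_inv {nodes : List String} {p : List (String × String × String)}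
    {e : String × String × String}
    {st : PySem.Set String × PySem.Dict String (PySem.Set String)}
    (h1 : pvVertsOK nodes p st.1) (h2 : pvPredsOK p st.2) :
    pvVertsOK nodes (p ++ [e]) (pvBBuildStep st e).1 ∧ pvPredsOK (p ++ [e]) (pvBBuildStep st e).2 := by
  obtain ⟨verts, pd⟩ := st
  dsimp only at h1 h2 ⊢
  simp only [pvBBuildStep]
  obtain ⟨hvN, hvM⟩ := h1
  constructor
  · refine ⟨PySem.Set.nodup_add _ _ (PySem.Set.nodup_add _ _ hvN), fun x => ?_⟩
    rw [PySem.Set.mem_add, PySem.Set.mem_add, hvM x]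
    constructor
    · rintro ((h | rfl) | rfl)
      · rcases h with h | ⟨e', he', hx⟩
        · exact Or.inl h
        · exact Or.inr ⟨e', List.mem_append.mpr (Or.inl he'), hx⟩
      · exact Or.inr ⟨e, List.mem_append.mpr (Or.inr (by simp)), Or.inl rfl⟩
      · exact Or.inr ⟨e, List.mem_append.mpr (Or.inr (by simp)), Or.inr rfl⟩
    · rintro (h | ⟨e', he', hx⟩)
      · exact Or.inl (Or.inl (Or.inl h))
      · rcases List.mem_append.mp he' with h' | h'
        · exact Or.inl (Or.inl (Or.inr ⟨e', h', hx⟩))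
        · obtain rfl : e' = e := by simpa using h'
          rcases hx with rfl | rfl
          · exact Or.inl (Or.inr rfl)
          · exact Or.inr rfl
  · intro v
    by_cases hv : v = e.2.1
    · subst hv
      rw [PySem.Dict.get?_insert_self]
      constructor
      · intro h; cases h
      · rintro q hq
        obtain rfl : PySem.Set.add ((pd.get? e.2.1).getD PySem.Set.empty) e.1 = q := by
          injection hq
        refine ⟨⟨e.1, (PySem.Set.mem_add ..).mpr (Or.inr rfl)⟩, fun u => ?_⟩
        rw [PySem.Set.mem_add, pvEdge_append_singleton]
        cases hp : pd.get? e.2.1 with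
        | none =>
          have hnone := (h2 e.2.1).1 hp
          simp only [Option.getD_none]
          constructor
          · rintro (hu | rfl)
            · cases hu
            · exact Or.inr ⟨rfl, by trivial⟩
          · rintro (h | ⟨rfl, -⟩)
            · exact absurd h (hnone u)
            · exact Or.inr rfl
        | some q0 =>
          obtain ⟨-, hiff⟩ := (h2 e.2.1).2 q0 hp
          simp only [Option.getD_some]
          constructor
          · rintro (hu | rfl)
            · exact Or.inl ((hiff u).mp hu)
            · exact Or.inr ⟨rfl, by trivial⟩
          · rintro (h | ⟨rfl, -⟩)
            · exact Or.inl ((hiff u).mpr h)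
            · exact Or.inr rfl
    · rw [PySem.Dict.get?_insert_of_ne _ _ hv]
      constructor
      · intro h u he
        rcases pvEdge_append_singleton.mp he with h' | ⟨-, h21⟩
        · exact (h2 v).1 h u h'
        · exact hv h21
      · rintro q hq
        obtain ⟨hne, hiff⟩ := (h2 v).2 q hq
        refine ⟨hne, fun u => ?_⟩
        rw [hiff u, pvEdge_append_singleton]
        constructor
        · exact Or.inl
        · rintro (h | ⟨-, h21⟩)
          · exact h
          · exact absurd h21 hv

lemma pvBBuild_char (nodes : List String) (edges : List (String × String × String)) :
    pvVertsOK nodes edges (edges.foldl pvBBuildStep (PySem.Set.ofList nodes, PySem.Dict.empty)).1 ∧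
    pvPredsOK edges (edges.foldl pvBBuildStep (PySem.Set.ofList nodes, PySem.Dict.empty)).2 := by
  suffices h : ∀ (l p : List (String × String × String))
      (st : PySem.Set String × PySem.Dict String (PySem.Set String)),
      pvVertsOK nodes p st.1 → pvPredsOK p st.2 →
      pvVertsOK nodes (p ++ l) (l.foldl pvBBuildStep st).1 ∧
        pvPredsOK (p ++ l) (l.foldl pvBBuildStep st).2 by
    have := h edges [] (PySem.Set.ofList nodes, PySem.Dict.empty) ?_ ?_
    · simpa using this
    · exact ⟨PySem.Set.nodup_ofList _, fun x => by simp [PySem.Set.mem_ofList]⟩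
    · intro v
      simp [PySem.Dict.get?_empty, pvEdge]
  intro l
  induction l with
  | nil => intro p st h1 h2; simpa using ⟨h1, h2⟩
  | cons e l ih =>
    intro p st h1 h2
    obtain ⟨h1', h2'⟩ := pvBBuildStep_inv (e := e) h1 h2
    have := ih (p ++ [e]) (pvBBuildStep st e) h1' h2'
    rwa [List.append_cons, List.foldl_cons]

-- characterisation of one pass of Kahn's inner for-loop
lemma pvAStep_fold_char {l : List String} (hl : l.Nodup) (d : PySem.Dict String Int)
    (q : List String) :
    (∀ v, (l.foldl pvAStep (d, q)).1.getD v 0 = d.getD v 0 - (if v ∈ l then 1 else 0)) ∧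
    (l.foldl pvAStep (d, q)).2 = q ++ l.filter (fun w => d.getD w 0 == 1) := by
  induction l generalizing d q with
  | nil => simp
  | cons w l ih =>
    obtain ⟨hwl, hl'⟩ := List.nodup_cons.mp hl
    have hstep : pvAStep (d, q) w =
        if (d.modify w 0 (· - 1)).getD w 0 == 0 then (d.modify w 0 (· - 1), q ++ [w])
        else (d.modify w 0 (· - 1), q) := by
      simp [pvAStep]
    have hgd : ∀ v, (d.modify w 0 (· - 1)).getD v 0
        = if v = w then d.getD w 0 - 1 else d.getD v 0 := fun v =>
      PySem.Dict.getD_modify (d := d) (k := w) (k' := v) (d0 := 0) (f := (· - 1))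
    have hfiltcong : ∀ q' : List String,
        l.filter (fun x => (d.modify w 0 (· - 1)).getD x 0 == 1)
          = l.filter (fun x => d.getD x 0 == 1) :=
      fun _ => List.filter_congr (fun x hx => by
        have hxw : x ≠ w := fun h => hwl (h ▸ hx)
        rw [hgd x, if_neg hxw])
    simp only [List.foldl_cons, hstep]
    by_cases h1 : (d.modify w 0 (· - 1)).getD w 0 == 0
    · have h1' : d.getD w 0 = 1 := by
        have := hgd w; rw [if_pos rfl] at this
        have h0 : (d.modify w 0 (· - 1)).getD w 0 = 0 := by simpa using h1
        omega
      rw [if_pos h1]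
      obtain ⟨ihd, ihq⟩ := ih hl' (d.modify w 0 (· - 1)) (q ++ [w])
      refine ⟨fun v => ?_, ?_⟩
      · rw [ihd v, hgd v]
        by_cases hvw : v = w
        · subst hvw
          simp [hwl, List.mem_cons]
        · simp [hvw, List.mem_cons]
      · rw [ihq, hfiltcong q, List.filter_cons]
        simp [h1']
    · have h1' : ¬ d.getD w 0 = 1 := by
        intro h
        apply h1
        have := hgd w; rw [if_pos rfl] at this
        simp [this, h]
      rw [if_neg h1]
      obtain ⟨ihd, ihq⟩ := ih hl' (d.modify w 0 (· - 1)) q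
      refine ⟨fun v => ?_, ?_⟩
      · rw [ihd v, hgd v]
        by_cases hvw : v = w
        · subst hvw
          simp [hwl, List.mem_cons]
        · simp [hvw, List.mem_cons]
      · rw [ihq, hfiltcong q, List.filter_cons]
        simp [h1']

-- the loop invariant of Kahn's while-loop
def pvInv (nodes : List String) (edges : List (String × String × String))
    (q V : List String) (indeg : PySem.Dict String Int) : Prop :=
  (∀ v, indeg.getD v 0 =
      (pvIndegN edges v : Int) - (((pvPreds edges v).filter (fun u => decide (u ∈ V))).length : Int)) ∧
  q.Nodup ∧ (∀ u ∈ q, u ∉ V) ∧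
  (∀ v, (v ∈ V ∨ v ∈ q) → indeg.getD v 0 ≤ 0) ∧
  (∀ v, 1 ≤ pvIndegN edges v → indeg.getD v 0 ≤ 0 → (v ∈ V ∨ v ∈ q)) ∧
  (∀ n ∈ nodes, pvIndegN edges n = 0 → (n ∈ V ∨ n ∈ q))

lemma pv_filter_add_mem {l : List String} (hl : l.Nodup) {V : List String} {a : String}
    (ha : a ∉ V) :
    (l.filter (fun u => decide (u ∈ PySem.Set.add V a))).length
      = (l.filter (fun u => decide (u ∈ V))).length + (if a ∈ l then 1 else 0) := by
  induction l with
  | nil => simp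
  | cons x l ih =>
    obtain ⟨hxl, hl'⟩ := List.nodup_cons.mp hl
    have ihl := ih hl'
    simp only [List.filter_cons]
    by_cases hxa : x = a
    · subst hxa
      have h1 : (decide (x ∈ PySem.Set.add V x)) = true :=
        decide_eq_true ((PySem.Set.mem_add ..).mpr (Or.inr rfl))
      have h2 : (decide (x ∈ V)) = false := decide_eq_false ha
      rw [h1, h2]
      have hcong : l.filter (fun u => decide (u ∈ PySem.Set.add V x))
          = l.filter (fun u => decide (u ∈ V)) :=
        List.filter_congr (fun u hu => by
          have hux : u ≠ x := fun h => hxl (h ▸ hu)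
          simp [PySem.Set.mem_add, hux])
      rw [if_pos rfl, if_neg (by simp), hcong]
      simp [List.mem_cons]
    · have hhead : (decide (x ∈ PySem.Set.add V a)) = (decide (x ∈ V)) := by
        simp [PySem.Set.mem_add, hxa]
      rw [hhead]
      have hmem : (a ∈ x :: l) ↔ (a ∈ l) := by
        rw [List.mem_cons]
        exact ⟨fun h => h.elim (fun h' => absurd h'.symm hxa) id, Or.inr⟩
      by_cases hx : (decide (x ∈ V)) = true
      · rw [if_pos hx, if_pos hx]
        simp only [List.length_cons, ihl, hmem]
        omega
      · rw [if_neg hx, if_neg hx]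
        simp only [ihl, hmem]

lemma pvALoop_main (nodes : List String) (edges : List (String × String × String))
    (adj : PySem.Dict String (PySem.Set String)) (hadj : pvAdjOK edges adj)
    (R : List String)
    (hR1 : ∀ w, 1 ≤ pvIndegN edges w → (∀ u ∈ pvPreds edges w, u ∈ R) → w ∈ R) :
    ∀ (q V : List String) (indeg : PySem.Dict String Int),
      pvInv nodes edges q V indeg → (∀ x, (x ∈ V ∨ x ∈ q) → x ∈ R) →
      ((∀ x ∈ V, x ∈ pvALoop adj q V indeg) ∧
       (∀ x ∈ pvALoop adj q V indeg, x ∈ R) ∧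
       (∀ w ∈ nodes, pvIndegN edges w = 0 → w ∈ pvALoop adj q V indeg) ∧
       (∀ w, 1 ≤ pvIndegN edges w → (∀ u ∈ pvPreds edges w, u ∈ pvALoop adj q V indeg) →
          w ∈ pvALoop adj q V indeg)) := by
  intro q V indeg
  induction q, V, indeg using pvALoop.induct adj with
  | case1 V indeg =>
    intro hInv hVR
    obtain ⟨hI2, hI3a, hI3b, hI7, hI4, hI6⟩ := hInv
    simp only [pvALoop]
    refine ⟨fun x hx => hx, fun x hx => hVR x (Or.inl hx), ?_, ?_⟩
    · intro w hw hdeg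
      rcases hI6 w hw hdeg with h | h
      · exact h
      · cases h
    · intro w hdeg hpreds
      have hfull : (pvPreds edges w).filter (fun u => decide (u ∈ V)) = pvPreds edges w :=
        List.filter_eq_self.mpr (fun u hu => decide_eq_true (hpreds u hu))
      have hc : indeg.getD w 0 ≤ 0 := by
        rw [hI2 w, hfull]
        simp [pvIndegN]
      rcases hI4 w hdeg hc with h | h
      · exact h
      · cases h
  | case2 V indeg node rest nbrs0 st0 ih =>
    intro hInv hVR
    obtain ⟨hI2, hI3a, hI3b, hI7, hI4, hI6⟩ := hInv
    obtain ⟨hqn1, hqn2⟩ := List.nodup_cons.mp hI3a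
    have hnodeV : node ∉ (V : List String) := hI3b node List.mem_cons_self
    obtain ⟨hnbrN, hnbrM⟩ := hadj node
    obtain ⟨hcd, hcq⟩ := pvAStep_fold_char hnbrN indeg rest
    set nbrs := (adj.get? node).getD PySem.Set.empty with hnbrs
    set stp := nbrs.foldl pvAStep (indeg, rest) with hstp
    set news := nbrs.filter (fun w => indeg.getD w 0 == 1) with hnews
    have hnewsmem : ∀ w, w ∈ news ↔ (w ∈ nbrs ∧ indeg.getD w 0 = 1) := by
      intro w
      rw [hnews, List.mem_filter]
      simp
    have hpos : ∀ v, 0 ≤ indeg.getD v 0 := by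
      intro v
      rw [hI2 v]
      have hle : ((pvPreds edges v).filter (fun u => decide (u ∈ V))).length
          ≤ pvIndegN edges v := List.length_filter_le _ _
      omega
    have hmemnbr : ∀ v, v ∈ nbrs ↔ node ∈ pvPreds edges v :=
      fun v => (hnbrM v).trans mem_pvPreds.symm
    have hc2' : ∀ v, stp.1.getD v 0 = (pvIndegN edges v : Int)
        - (((pvPreds edges v).filter (fun u => decide (u ∈ PySem.Set.add V node))).length : Int) := by
      intro v
      rw [hcd v, hI2 v]
      have hflt := pv_filter_add_mem (pvPreds_nodup edges v) (V := V) (a := node) hnodeV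
      by_cases hv : v ∈ nbrs
      · rw [if_pos hv, hflt, if_pos ((hmemnbr v).mp hv)]
        push_cast
        ring
      · rw [if_neg hv, hflt, if_neg (fun h => hv ((hmemnbr v).mpr h))]
        push_cast
        ring
    have hq2 : stp.2 = rest ++ news := hcq
    have hnewsN : news.Nodup := hnbrN.filter _
    have hdisj : ∀ x ∈ rest, x ∉ news := by
      intro x hxr hxn
      obtain ⟨-, h1⟩ := (hnewsmem x).mp hxn
      have h2 := hI7 x (Or.inr (List.mem_cons_of_mem _ hxr))
      omega
    have hq2nd : (rest ++ news).Nodup := hqn2.append hnewsN hdisj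
    have hq2V : ∀ u ∈ rest ++ news, u ∉ PySem.Set.add V node := by
      intro u hu hmem
      rcases (PySem.Set.mem_add ..).mp hmem with huV | rfl
      · rcases List.mem_append.mp hu with h | h
        · exact hI3b u (List.mem_cons_of_mem _ h) huV
        · obtain ⟨-, h1⟩ := (hnewsmem u).mp h
          have h2 := hI7 u (Or.inl huV)
          omega
      · rcases List.mem_append.mp hu with h | h
        · exact hqn1 h
        · obtain ⟨-, h1⟩ := (hnewsmem u).mp h
          have h2 := hI7 u (Or.inr List.mem_cons_self)
          omega
    have hI7' : ∀ v, (v ∈ PySem.Set.add V node ∨ v ∈ rest ++ news) → stp.1.getD v 0 ≤ 0 := by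
      intro v hv
      have hold : stp.1.getD v 0 = indeg.getD v 0 - (if v ∈ nbrs then 1 else 0) := hcd v
      rcases hv with hv | hv
      · rcases (PySem.Set.mem_add ..).mp hv with h | rfl
        · have := hI7 v (Or.inl h)
          rw [hold]
          split <;> omega
        · have := hI7 v (Or.inr List.mem_cons_self)
          rw [hold]
          split <;> omega
      · rcases List.mem_append.mp hv with h | h
        · have := hI7 v (Or.inr (List.mem_cons_of_mem _ h))
          rw [hold]
          split <;> omega
        · obtain ⟨hn, h1⟩ := (hnewsmem v).mp h
          rw [hold, if_pos hn]
          omega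
    have hI4' : ∀ v, 1 ≤ pvIndegN edges v → stp.1.getD v 0 ≤ 0 →
        (v ∈ PySem.Set.add V node ∨ v ∈ rest ++ news) := by
      intro v hdeg hc
      rw [hcd v] at hc
      by_cases hv : v ∈ nbrs
      · rw [if_pos hv] at hc
        have h0 := hpos v
        by_cases h1 : indeg.getD v 0 = 1
        · exact Or.inr (List.mem_append.mpr (Or.inr ((hnewsmem v).mpr ⟨hv, h1⟩)))
        · rcases hI4 v hdeg (by omega) with h | h
          · exact Or.inl ((PySem.Set.mem_add ..).mpr (Or.inl h))
          · rcases List.mem_cons.mp h with rfl | h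
            · exact Or.inl ((PySem.Set.mem_add ..).mpr (Or.inr rfl))
            · exact Or.inr (List.mem_append.mpr (Or.inl h))
      · rw [if_neg hv] at hc
        rcases hI4 v hdeg (by omega) with h | h
        · exact Or.inl ((PySem.Set.mem_add ..).mpr (Or.inl h))
        · rcases List.mem_cons.mp h with rfl | h
          · exact Or.inl ((PySem.Set.mem_add ..).mpr (Or.inr rfl))
          · exact Or.inr (List.mem_append.mpr (Or.inl h))
    have hI6' : ∀ n ∈ nodes, pvIndegN edges n = 0 →
        (n ∈ PySem.Set.add V node ∨ n ∈ rest ++ news) := by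
      intro n hn hdeg
      rcases hI6 n hn hdeg with h | h
      · exact Or.inl ((PySem.Set.mem_add ..).mpr (Or.inl h))
      · rcases List.mem_cons.mp h with rfl | h
        · exact Or.inl ((PySem.Set.mem_add ..).mpr (Or.inr rfl))
        · exact Or.inr (List.mem_append.mpr (Or.inl h))
    have hclo' : ∀ x, (x ∈ PySem.Set.add V node ∨ x ∈ rest ++ news) → x ∈ R := by
      intro x hx
      rcases hx with hx | hx
      · rcases (PySem.Set.mem_add ..).mp hx with h | rfl
        · exact hVR x (Or.inl h)
        · exact hVR x (Or.inr List.mem_cons_self)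
      · rcases List.mem_append.mp hx with h | h
        · exact hVR x (Or.inr (List.mem_cons_of_mem _ h))
        · obtain ⟨hxn, hx1⟩ := (hnewsmem x).mp h
          have hdeg : 1 ≤ pvIndegN edges x := pvIndegN_pos (mem_pvPreds.mp ((hmemnbr x).mp hxn))
          have hc0 : stp.1.getD x 0 = 0 := by
            rw [hcd x, if_pos hxn]
            omega
          have hlen : ((pvPreds edges x).filter
              (fun u => decide (u ∈ PySem.Set.add V node))).length = pvIndegN edges x := by
            have h3 := hc2' x
            rw [hc0] at h3
            omega
          have hall : (pvPreds edges x).filter (fun u => decide (u ∈ PySem.Set.add V node))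
              = pvPreds edges x :=
            List.Sublist.eq_of_length List.filter_sublist (by rw [hlen]; rfl)
          refine hR1 x hdeg (fun u hu => ?_)
          have hu' : u ∈ (pvPreds edges x).filter (fun u => decide (u ∈ PySem.Set.add V node)) := by
            rw [hall]
            exact hu
          rcases (PySem.Set.mem_add ..).mp (of_decide_eq_true ((List.mem_filter.mp hu').2)) with h' | rfl
          · exact hVR u (Or.inl h')
          · exact hVR u (Or.inr List.mem_cons_self)
    have hInv' : pvInv nodes edges stp.2 (PySem.Set.add V node) stp.1 := by
      rw [pvInv, hq2]
      exact ⟨hc2', hq2nd, hq2V, hI7', hI4', hI6'⟩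
    have hclo'' : ∀ x, (x ∈ PySem.Set.add V node ∨ x ∈ stp.2) → x ∈ R := by
      rw [hq2]
      exact hclo'
    obtain ⟨ih1, ih2, ih3, ih4⟩ := ih hInv' hclo''
    simp only [pvALoop]
    exact ⟨fun x hx => ih1 x ((PySem.Set.mem_add ..).mpr (Or.inl hx)), ih2, ih3, ih4⟩

-- B's fixpoint rounds
def pvCore (nodes : List String) (preds : PySem.Dict String (PySem.Set String))
    (S : List String) (w : String) : Prop :=
  match preds.get? w with
  | some p => ∀ u ∈ p, u ∈ S
  | none => w ∈ nodes

lemma pvBCond_iff {nodes : List String} {preds : PySem.Dict String (PySem.Set String)}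
    {r : PySem.Set String} {w : String} :
    pvBCond nodes preds r w = true ↔ (w ∉ (r : List String) ∧ pvCore nodes preds r w) := by
  cases h : preds.get? w <;>
    simp [pvBCond, pvCore, h, PySem.Set.issubset_iff]

lemma pvBRounds_fix {nodes : List String} {verts : PySem.Set String}
    {preds : PySem.Dict String (PySem.Set String)} (hverts : (verts : List String).Nodup) :
    ∀ (fuel : Nat) (r : PySem.Set String), (r : List String).Nodup →
      (∀ x ∈ (r : List String), x ∈ verts) →
      (verts : List String).length - (r : List String).length < fuel →
      ∀ w ∈ (verts : List String),
        pvCore nodes preds (pvBRounds nodes verts preds fuel r) w →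
        w ∈ pvBRounds nodes verts preds fuel r := by
  intro fuel
  induction fuel with
  | zero => intro r _ _ hlt; omega
  | succ fuel ih =>
    intro r hrnd hrsub hlt w hw hcore
    simp only [pvBRounds] at hcore ⊢
    by_cases hemp : (List.filter (pvBCond nodes preds r) verts).isEmpty
    · rw [if_pos hemp] at hcore ⊢
      by_contra hwr
      have hcond : pvBCond nodes preds r w = true := pvBCond_iff.mpr ⟨hwr, hcore⟩
      have hmem : w ∈ List.filter (pvBCond nodes preds r) verts :=
        List.mem_filter.mpr ⟨hw, hcond⟩
      rw [List.isEmpty_iff.mp hemp] at hmem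
      cases hmem
    · rw [if_neg hemp] at hcore ⊢
      have hnewsnd : (List.filter (pvBCond nodes preds r) verts).Nodup := hverts.filter _
      have hnewsdisj : ∀ x ∈ List.filter (pvBCond nodes preds r) verts, x ∉ (r : List String) :=
        fun x hx => (pvBCond_iff.mp (List.of_mem_filter hx)).1
      have hupd : PySem.Set.update r (List.filter (pvBCond nodes preds r) verts)
          = r ++ List.filter (pvBCond nodes preds r) verts :=
        PySem.Set.update_eq_append_of_disjoint r _ hnewsnd hnewsdisj
      have hnd' : (r ++ List.filter (pvBCond nodes preds r) verts).Nodup :=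
        hrnd.append hnewsnd (fun x hxr hxn => hnewsdisj x hxn hxr)
      have hsub' : ∀ x ∈ r ++ List.filter (pvBCond nodes preds r) verts, x ∈ verts := by
        intro x hx
        rcases List.mem_append.mp hx with h | h
        · exact hrsub x h
        · exact (List.mem_filter.mp h).1
      have hlen : (r ++ List.filter (pvBCond nodes preds r) verts).length
          ≤ (verts : List String).length := (List.subperm_of_subset hnd' hsub').length_le
      have hne : List.filter (pvBCond nodes preds r) verts ≠ [] := by
        simpa [List.isEmpty_iff] using hemp
      have hpos : 1 ≤ (List.filter (pvBCond nodes preds r) verts).length :=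
        List.length_pos_of_ne_nil hne
      have hlt' : (verts : List String).length
          - (r ++ List.filter (pvBCond nodes preds r) verts).length < fuel := by
        rw [List.length_append] at hlen ⊢
        omega
      rw [hupd] at hcore ⊢
      exact ih (r ++ List.filter (pvBCond nodes preds r) verts) hnd' hsub' hlt' w hw hcore

lemma pvBRounds_sub {nodes : List String} {verts : PySem.Set String}
    {preds : PySem.Dict String (PySem.Set String)} {VA : List String}
    (hstep : ∀ (r : List String) (w : String), (∀ x ∈ r, x ∈ VA) → w ∈ (verts : List String) →
        pvCore nodes preds r w → w ∈ VA) :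
    ∀ (fuel : Nat) (r : PySem.Set String), (∀ x ∈ (r : List String), x ∈ VA) →
      ∀ x ∈ pvBRounds nodes verts preds fuel r, x ∈ VA := by
  intro fuel
  induction fuel with
  | zero => intro r hr x hx; exact hr x hx
  | succ fuel ih =>
    intro r hr x hx
    simp only [pvBRounds] at hx
    by_cases hemp : (List.filter (pvBCond nodes preds r) verts).isEmpty
    · rw [if_pos hemp] at hx
      exact hr x hx
    · rw [if_neg hemp] at hx
      refine ih _ ?_ x hx
      intro y hy
      rcases (PySem.Set.mem_update ..).mp hy with h | h
      · exact hr y h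
      · have hf := List.mem_filter.mp h
        obtain ⟨-, hcore⟩ := pvBCond_iff.mp hf.2
        exact hstep r y hr hf.1 hcore

-- the assembled equivalence
lemma pv_main_equiv (nodes : List String) (edges : List (String × String × String))
    (hnd : nodes.Nodup) :
    topological_sort_check_py nodes edges = topological_sort_check_py_alt nodes edges := by
  obtain ⟨hadj, hindeg⟩ := pvABuild_char edges
  obtain ⟨⟨hvN, hvM⟩, hpd⟩ := pvBBuild_char nodes edges
  set stA := edges.foldl pvAEdgeStep (PySem.Dict.empty, PySem.Dict.empty) with hstA
  set stB := edges.foldl pvBBuildStep (PySem.Set.ofList nodes, PySem.Dict.empty) with hstB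
  set RB := pvBRounds nodes stB.1 stB.2 (stB.1.length + 1) PySem.Set.empty with hRB
  have hfix : ∀ w ∈ (stB.1 : List String), pvCore nodes stB.2 RB w → w ∈ RB := by
    intro w hw hcore
    refine pvBRounds_fix hvN (stB.1.length + 1) PySem.Set.empty ?_ ?_ ?_ w hw hcore
    · exact List.nodup_nil
    · intro x hx
      cases hx
    · simp only [PySem.Set.empty, List.length_nil]
      omega
  have hR0 : ∀ w ∈ nodes, pvIndegN edges w = 0 → w ∈ RB := by
    intro w hw hdeg
    have hwv : w ∈ (stB.1 : List String) := (hvM w).mpr (Or.inl hw)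
    refine hfix w hwv ?_
    cases hp : stB.2.get? w with
    | none => simpa [pvCore, hp] using hw
    | some p =>
      obtain ⟨⟨u, hu⟩, hiff⟩ := (hpd w).2 p hp
      exact absurd (pvIndegN_pos ((hiff u).mp hu)) (by omega)
  have hR1 : ∀ w, 1 ≤ pvIndegN edges w → (∀ u ∈ pvPreds edges w, u ∈ RB) → w ∈ RB := by
    intro w hdeg hsubp
    have hne : pvPreds edges w ≠ [] := by
      intro h
      rw [pvIndegN, h] at hdeg
      simp at hdeg
    obtain ⟨u0, hu0⟩ := List.exists_mem_of_ne_nil _ hne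
    have hedge : pvEdge edges u0 w := mem_pvPreds.mp hu0
    obtain ⟨s0, hs0⟩ := hedge
    have hwv : w ∈ (stB.1 : List String) := (hvM w).mpr (Or.inr ⟨(u0, w, s0), hs0, Or.inr rfl⟩)
    refine hfix w hwv ?_
    cases hp : stB.2.get? w with
    | none => exact absurd ⟨s0, hs0⟩ ((hpd w).1 hp u0)
    | some p =>
      obtain ⟨-, hiff⟩ := (hpd w).2 p hp
      simp only [pvCore, hp]
      intro u hu
      exact hsubp u (mem_pvPreds.mpr ((hiff u).mp hu))
  set q0 := nodes.filter (fun n => stA.2.getD n 0 == 0) with hq0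
  have hq0mem : ∀ n, n ∈ q0 ↔ (n ∈ nodes ∧ pvIndegN edges n = 0) := by
    intro n
    rw [hq0, List.mem_filter]
    constructor
    · rintro ⟨hn, hb⟩
      refine ⟨hn, ?_⟩
      have h1 := hindeg n
      have hb' : stA.2.getD n 0 = 0 := by simpa using hb
      omega
    · rintro ⟨hn, hz⟩
      refine ⟨hn, ?_⟩
      rw [hindeg n, hz]
      simp
  have hInv0 : pvInv nodes edges q0 PySem.Set.empty stA.2 := by
    refine ⟨?_, ?_, ?_, ?_, ?_, ?_⟩
    · intro v
      rw [hindeg v]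
      have hnilf : (pvPreds edges v).filter
          (fun u => decide (u ∈ (PySem.Set.empty : List String))) = [] := by
        apply List.filter_eq_nil_iff.mpr
        intro a ha
        simp [PySem.Set.empty]
      rw [hnilf]
      simp
    · exact hnd.filter _
    · intro u hu h
      cases h
    · intro v hv
      rcases hv with h | h
      · cases h
      · rw [hindeg v]
        have := ((hq0mem v).mp h).2
        omega
    · intro v hdeg hc
      rw [hindeg v] at hc
      exfalso
      omega
    · intro n hn hdeg
      exact Or.inr ((hq0mem n).mpr ⟨hn, hdeg⟩)
  have hclo0 : ∀ x, (x ∈ (PySem.Set.empty : List String) ∨ x ∈ q0) → x ∈ RB := by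
    intro x hx
    rcases hx with h | h
    · cases h
    · obtain ⟨hn, hz⟩ := (hq0mem x).mp h
      exact hR0 x hn hz
  obtain ⟨-, hVAsub, hKc, hKd⟩ :=
    pvALoop_main nodes edges stA.1 hadj RB hR1 q0 PySem.Set.empty stA.2 hInv0 hclo0
  set VA := pvALoop stA.1 q0 PySem.Set.empty stA.2 with hVA
  have hstep : ∀ (r : List String) (w : String), (∀ x ∈ r, x ∈ VA) →
      w ∈ (stB.1 : List String) → pvCore nodes stB.2 r w → w ∈ VA := by
    intro r w hr hwv hcore
    cases hp : stB.2.get? w with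
    | none =>
      have hdeg : pvIndegN edges w = 0 := pvIndegN_eq_zero.mpr ((hpd w).1 hp)
      have hw_nodes : w ∈ nodes := by simpa [pvCore, hp] using hcore
      exact hKc w hw_nodes hdeg
    | some p =>
      obtain ⟨⟨u0, hu0⟩, hiff⟩ := (hpd w).2 p hp
      have hdeg : 1 ≤ pvIndegN edges w := pvIndegN_pos ((hiff u0).mp hu0)
      refine hKd w hdeg (fun u hu => ?_)
      have hup : u ∈ p := (hiff u).mpr (mem_pvPreds.mp hu)
      have hcore' : ∀ u ∈ p, u ∈ r := by simpa [pvCore, hp] using hcore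
      exact hr u (hcore' u hup)
  have hRBsub : ∀ x ∈ RB, x ∈ VA :=
    pvBRounds_sub hstep (stB.1.length + 1) PySem.Set.empty (by intro x hx; cases hx)
  have hiffVR : ∀ x, x ∈ (VA : List String) ↔ x ∈ (RB : List String) :=
    fun x => ⟨hVAsub x, hRBsub x⟩
  have hA : topological_sort_check_py nodes edges =
      (if (PySem.Set.diff (PySem.Set.ofList nodes) VA).isEmpty then []
       else edges.filter (fun e =>
         PySem.Set.contains (PySem.Set.diff (PySem.Set.ofList nodes) VA) e.1 &&
         PySem.Set.contains (PySem.Set.diff (PySem.Set.ofList nodes) VA) e.2.1)) := rfl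
  have hB : topological_sort_check_py_alt nodes edges =
      edges.filter (fun e =>
        PySem.Set.contains (PySem.Set.diff (PySem.Set.ofList nodes) RB) e.1 &&
        PySem.Set.contains (PySem.Set.diff (PySem.Set.ofList nodes) RB) e.2.1) := rfl
  set cycA := PySem.Set.diff (PySem.Set.ofList nodes) VA with hcycA
  set cycB := PySem.Set.diff (PySem.Set.ofList nodes) RB with hcycB
  have hcyc : ∀ x, x ∈ (cycA : List String) ↔ x ∈ (cycB : List String) := by
    intro x
    rw [hcycA, hcycB]
    simp only [PySem.Set.mem_diff]
    rw [hiffVR x]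
  have hcontains : ∀ x, PySem.Set.contains cycA x = PySem.Set.contains cycB x := by
    intro x
    by_cases h : x ∈ (cycA : List String)
    · have h1 : PySem.Set.contains cycA x = true := (PySem.Set.contains_iff ..).mpr h
      have h2 : PySem.Set.contains cycB x = true := (PySem.Set.contains_iff ..).mpr ((hcyc x).mp h)
      rw [h1, h2]
    · have h1 : PySem.Set.contains cycA x = false := by
        cases hb : PySem.Set.contains cycA x
        · rfl
        · exact absurd ((PySem.Set.contains_iff ..).mp hb) h
      have h2 : PySem.Set.contains cycB x = false := by
        cases hb : PySem.Set.contains cycB x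
        · rfl
        · exact absurd ((hcyc x).mpr ((PySem.Set.contains_iff ..).mp hb)) h
      rw [h1, h2]
  rw [hA, hB]
  by_cases hemp : (cycA : List String).isEmpty
  · rw [if_pos hemp]
    symm
    apply List.filter_eq_nil_iff.mpr
    intro e he hcontr
    rw [Bool.and_eq_true] at hcontr
    have hmemB := (PySem.Set.contains_iff ..).mp hcontr.1
    have hxA : e.1 ∈ (cycA : List String) := (hcyc e.1).mpr hmemB
    rw [List.isEmpty_iff.mp hemp] at hxA
    cases hxA
  · rw [if_neg hemp]
    apply List.filter_congr
    intro e he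
    rw [hcontains e.1, hcontains e.2.1]

-- ===== VERDICT (by name: the statement is the Claim_ definition above) =====
theorem topological_sort_check_py_spec : Claim_equal_topological_sort_check_py := by
  intro nodes edges _hdom hpre
  unfold Spec_topological_sort_check_py
  exact pv_main_equiv nodes edges hpre
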